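-- pv_equiv track=rewrite | github.com/vZyx/Python-notes | 12_lists/homework/10/06.py | smallest_pair
-- ===== SOURCE A (Python) =====
-- def smallest_pair(lst):
--     # calculate Ai+Aj+j-i for every pair (i,j)
--
--     ans = None
--     for pos1, item1 in enumerate(lst):
--         for pos2 in range(pos1+1, len(lst)):
--             item2 = lst[pos2]
--
--             cur = item1 + item2 + pos2 - pos1
--
--             if ans is None or ans > cur:
--                 ans = cur
--     return ans
-- ===== SOURCE B (Python) =====
-- def smallest_pair(lst):
--     # O(n) single pass: for each j, the best partner i<j minimizes lst[i]-i,
--     # so track best = min(lst[i]-i) over the prefix and combine with lst[j]+j.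
--     ans = None
--     best = None
--     for j, item in enumerate(lst):
--         if best is not None:
--             cur = item + j + best
--             if ans is None or cur < ans:
--                 ans = cur
--         d = item - j
--         if best is None or d < best:
--             best = d
--     return ans
-- ===== Notes on version B (the rewrite author's own statement) =====
-- stated objective: faster
-- what changed: Replaced the O(n^2) all-pairs double loop by a single pass that keeps the running minimum of lst[i]-i and combines it with lst[j]+j at each j.
import Mathlib
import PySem

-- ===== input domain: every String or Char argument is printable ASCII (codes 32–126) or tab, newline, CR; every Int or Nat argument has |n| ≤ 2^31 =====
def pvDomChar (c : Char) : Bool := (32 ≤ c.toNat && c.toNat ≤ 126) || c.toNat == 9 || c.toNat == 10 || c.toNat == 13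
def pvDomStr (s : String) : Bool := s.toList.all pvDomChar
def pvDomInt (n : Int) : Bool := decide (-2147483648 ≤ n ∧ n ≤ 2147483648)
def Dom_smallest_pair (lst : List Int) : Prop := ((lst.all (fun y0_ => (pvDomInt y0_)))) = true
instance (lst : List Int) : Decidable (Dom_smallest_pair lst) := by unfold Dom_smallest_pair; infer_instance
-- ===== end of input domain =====

-- B replaces A's O(n^2) all-pairs scan by a single O(n) pass tracking min(lst[i]-i) over the prefix.

-- ===== PORT A =====
-- literal port of A: for every pos1, scan pos2 in range(pos1+1, len(lst)) and keep the running minimum of cur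
def smallest_pair (lst : List Int) : Option Int :=
  (PySem.List.enumerate lst 0).foldl
    (fun ans p =>
      (PySem.List.pyRange (p.1 + 1) (lst.length : Int) 1).foldl
        (fun ans pos2 =>
          let item2 := PySem.List.pyGetD lst pos2 0
          let cur := p.2 + item2 + pos2 - p.1
          match ans with
          | none => some cur
          | some a => if a > cur then some cur else some a)
        ans)
    none

-- ===== PORT B =====
-- loop body of Source B's single pass: state (ans, best) with best = min(lst[i]-i) over the prefix
def bstep (st : Option Int × Option Int) (p : Int × Int) : Option Int × Option Int :=
  let ans' : Option Int :=
    match st.2 with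
    | none => st.1
    | some b =>
      let cur := p.2 + p.1 + b
      match st.1 with
      | none => some cur
      | some a => if cur < a then some cur else some a
  let d := p.2 - p.1
  let best' : Option Int :=
    match st.2 with
    | none => some d
    | some b => if d < b then some d else some b
  (ans', best')

def smallest_pair_alt (lst : List Int) : Option Int :=
  ((PySem.List.enumerate lst 0).foldl bstep (none, none)).1

-- ===== PRECONDITION & SPEC =====
def Spec_smallest_pair (lst : List Int) (out : Option Int) : Prop := out = smallest_pair_alt lst
instance (lst : List Int) (out : Option Int) : Decidable (Spec_smallest_pair lst out) := by unfold Spec_smallest_pair; infer_instance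

-- ===== CLAIM (what is proved, stated in full; the proofs are below) =====
def Claim_equal_smallest_pair : Prop := ∀ (lst : List Int), Dom_smallest_pair lst → Spec_smallest_pair lst (smallest_pair lst)

-- ===== LEMMAS AND PROOFS =====

-- option-min (`none` = "no candidate yet"), its fold, and the list of all pair values
def m2 : Option Int → Option Int → Option Int
  | none, o => o
  | some a, none => some a
  | some a, some b => some (min a b)

def M : List Int → Option Int
  | [] => none
  | x :: t => m2 (some x) (M t)

def omin (o : Option Int) (c : Int) : Option Int := m2 o (some c)

def mfold (o : Option Int) (l : List Int) : Option Int := l.foldl omin o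

-- values x + y + t for y running over ys with offsets t, t+1, …
def rowL (x : Int) : List Int → Int → List Int
  | [], _ => []
  | y :: ys, t => (x + y + t) :: rowL x ys (t + 1)

-- all pair values A_i + A_j + (j - i), i < j (grouped by i; offsets are shift-invariant)
def P : List Int → List Int
  | [] => []
  | x :: xs => rowL x xs 1 ++ P xs

-- the column minima B produces: for each j the value lst[j] + j + min(best so far)
def colvals : List Int → Int → Int → List Int
  | [], _, _ => []
  | y :: ys, s, b => (y + s + b) :: colvals ys (s + 1) (min b (y - s))

-- the best accumulator B maintains
def dmin : List Int → Int → Int → Int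
  | [], _, b => b
  | y :: ys, s, b => dmin ys (s + 1) (min b (y - s))

theorem m2_assoc (a b c : Option Int) : m2 (m2 a b) c = m2 a (m2 b c) := by
  cases a <;> cases b <;> cases c <;> simp [m2, min_assoc]

theorem m2_comm (a b : Option Int) : m2 a b = m2 b a := by
  cases a <;> cases b <;> simp [m2, min_comm]

theorem m2_idem (a : Option Int) : m2 a a = a := by
  cases a <;> simp [m2]

theorem m2_left_comm (a b c : Option Int) : m2 a (m2 b c) = m2 b (m2 a c) := by
  rw [← m2_assoc, m2_comm a b, m2_assoc]

theorem m2_ac4 (u v x y : Option Int) : m2 (m2 u v) (m2 x y) = m2 (m2 u x) (m2 v y) := by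
  rw [m2_assoc, m2_assoc, m2_left_comm v x]

theorem m2_shuffle (r rb ry pp : Option Int) :
    m2 r (m2 (m2 rb pp) (m2 ry pp)) = m2 (m2 r rb) (m2 ry pp) := by
  rw [m2_ac4, m2_idem, m2_assoc, ← m2_assoc]

theorem mfold_eq (l : List Int) : ∀ o, mfold o l = m2 o (M l) := by
  induction l with
  | nil => intro o; cases o <;> rfl
  | cons x t ih =>
    intro o
    show mfold (omin o x) t = m2 o (M (x :: t))
    rw [ih, omin, M, m2_assoc]

theorem M_append (l1 l2 : List Int) : M (l1 ++ l2) = m2 (M l1) (M l2) := by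
  induction l1 with
  | nil => rfl
  | cons x t ih => simp [M, ih, m2_assoc]

theorem mfold_append (o : Option Int) (l1 l2 : List Int) :
    mfold (mfold o l1) l2 = mfold o (l1 ++ l2) := by
  simp [mfold, List.foldl_append]

theorem rowL_shift (ys : List Int) : ∀ x t x' t', x + t = x' + t' → rowL x ys t = rowL x' ys t' := by
  induction ys with
  | nil => intros; rfl
  | cons y ys ih =>
    intro x t x' t' h
    simp only [rowL]
    refine congrArg₂ _ (by omega) (ih x (t + 1) x' (t' + 1) (by omega))

theorem matchmin_gt (ans : Option Int) (c : Int) :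
    (match ans with
     | none => some c
     | some a => if a > c then some c else some a) = omin ans c := by
  cases ans with
  | none => rfl
  | some a =>
    simp only [omin, m2]
    split <;> exact congrArg some (by omega)

theorem matchmin_lt (ans : Option Int) (c : Int) :
    (match ans with
     | none => some c
     | some a => if c < a then some c else some a) = omin ans c := by
  cases ans with
  | none => rfl
  | some a =>
    simp only [omin, m2]
    split <;> exact congrArg some (by omega)

theorem colvals_split (ys : List Int) : ∀ (s b c : Int),
    M (colvals ys s (min b c)) = m2 (M (colvals ys s b)) (M (colvals ys s c)) := by
  induction ys with
  | nil => intros; rfl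
  | cons y ys ih =>
    intro s b c
    simp only [colvals, M]
    have h1 : min (min b c) (y - s) = min (min b (y - s)) (min c (y - s)) := by omega
    rw [h1, ih]
    have h2 : (some (y + s + min b c) : Option Int) = m2 (some (y + s + b)) (some (y + s + c)) := by
      simp only [m2]; exact congrArg some (by omega)
    rw [h2, m2_ac4]

theorem colvals_eq_P (xs : List Int) : ∀ (s b : Int),
    M (colvals xs s b) = m2 (M (rowL b xs s)) (M (P xs)) := by
  induction xs with
  | nil => intros; rfl
  | cons y ys ih =>
    intro s b
    simp only [colvals, rowL, P, M, M_append]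
    rw [colvals_split, ih, ih, rowL_shift ys (y - s) (s + 1) y 1 (by omega)]
    have hb : (y + s + b) = (b + y + s) := by omega
    rw [hb, m2_shuffle]

-- ===== A side: the double loop computes mfold over the pair values grouped by pos1 =====

theorem A_inner (L : List Int) (x s : Int) : ∀ (xs : List Int) (a : Nat), L.drop a = xs →
    (PySem.List.pyRange (a : Int) (L.length : Int) 1).map
      (fun j => x + PySem.List.pyGetD L j 0 + j - s) = rowL x xs ((a : Int) - s) := by
  intro xs
  induction xs with
  | nil =>
    intro a h
    have hlen : L.length ≤ a := List.drop_eq_nil_iff.mp h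
    rw [PySem.List.pyRange_one_eq_nil (by exact_mod_cast hlen)]
    rfl
  | cons y ys ih =>
    intro a h
    have ha : a < L.length := by
      have := congrArg List.length h
      simp [List.length_drop] at this
      omega
    have hy : L.drop a = L[a] :: L.drop (a + 1) := List.drop_eq_getElem_cons ha
    rw [hy] at h
    have hy1 : L[a] = y := (List.cons.injEq _ _ _ _ ▸ h).1
    have hys : L.drop (a + 1) = ys := (List.cons.injEq _ _ _ _ ▸ h).2
    rw [PySem.List.pyRange_one_cons (by exact_mod_cast ha)]
    simp only [List.map_cons, rowL]
    refine congrArg₂ _ ?_ ?_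
    · rw [PySem.List.pyGetD_natCast, List.getD_eq_getElem?_getD]
      simp [List.getElem?_eq_getElem ha, hy1]
      omega
    · have := ih (a + 1) hys
      push_cast at this ⊢
      rw [show ((a : Int) + 1) = ((a : Int) + 1) from rfl, this]
      exact rowL_shift ys x ((a : Int) + 1 - s) x ((a : Int) - s + 1) (by omega)

theorem A_outer (L : List Int) : ∀ (xs : List Int) (s : Nat) (o : Option Int), L.drop s = xs →
    (PySem.List.enumerate xs (s : Int)).foldl
      (fun ans p =>
        (PySem.List.pyRange (p.1 + 1) (L.length : Int) 1).foldl
          (fun ans j => omin ans (p.2 + PySem.List.pyGetD L j 0 + j - p.1)) ans) o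
    = mfold o (P xs) := by
  intro xs
  induction xs with
  | nil => intro s o _; simp [PySem.List.enumerate_nil, P, mfold]
  | cons x xs ih =>
    intro s o h
    rw [PySem.List.enumerate_cons, List.foldl_cons]
    have hxs : L.drop (s + 1) = xs := by
      have h2 := congrArg List.tail h
      rwa [List.tail_drop, List.tail_cons] at h2
    have hinner :
        (PySem.List.pyRange ((s : Int) + 1) (L.length : Int) 1).foldl
          (fun ans j => omin ans (x + PySem.List.pyGetD L j 0 + j - (s : Int))) o
        = mfold o (rowL x xs 1) := by
      rw [show ((s : Int) + 1) = ((s + 1 : Nat) : Int) from by push_cast; ring]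
      rw [← List.foldl_map (f := fun j => x + PySem.List.pyGetD L j 0 + j - (s : Int)) (g := omin)]
      rw [A_inner L x s xs (s + 1) hxs]
      rw [show ((s + 1 : Nat) : Int) - (s : Int) = 1 from by push_cast; ring]
      rfl
    have hstart : (s : Int) + 1 = ((s + 1 : Nat) : Int) := by push_cast; ring
    rw [hinner, hstart, ih (s + 1) _ hxs, mfold_append]
    rfl

theorem A_eq (lst : List Int) : smallest_pair lst = M (P lst) := by
  unfold smallest_pair
  have h1 :
      (PySem.List.enumerate lst 0).foldl
        (fun ans p =>
          (PySem.List.pyRange (p.1 + 1) (lst.length : Int) 1).foldl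
            (fun ans pos2 =>
              let item2 := PySem.List.pyGetD lst pos2 0
              let cur := p.2 + item2 + pos2 - p.1
              match ans with
              | none => some cur
              | some a => if a > cur then some cur else some a)
            ans)
        none
      = (PySem.List.enumerate lst 0).foldl
        (fun ans p =>
          (PySem.List.pyRange (p.1 + 1) (lst.length : Int) 1).foldl
            (fun ans j => omin ans (p.2 + PySem.List.pyGetD lst j 0 + j - p.1)) ans)
        none := by
    exact PySem.List.foldl_congr_mem _ _ _ _ (fun acc p _ =>
      PySem.List.foldl_congr_mem _ _ _ _ (fun ans j _ => matchmin_gt ans _))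
  rw [h1]
  have := A_outer lst lst 0 none (by simp)
  simp only [Nat.cast_zero] at this
  rw [this, mfold_eq]
  rfl

-- ===== B side: the single pass computes mfold over the column minima =====

theorem B_inv (xs : List Int) : ∀ (s b : Int) (ans : Option Int),
    (PySem.List.enumerate xs s).foldl bstep (ans, some b)
    = (mfold ans (colvals xs s b), some (dmin xs s b)) := by
  induction xs with
  | nil => intros; rfl
  | cons y ys ih =>
    intro s b ans
    rw [PySem.List.enumerate_cons, List.foldl_cons]
    have hstep : bstep (ans, some b) (s, y) = (omin ans (y + s + b), some (min b (y - s))) := by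
      unfold bstep
      simp only
      refine congrArg₂ _ ?_ ?_
      · exact matchmin_lt ans (y + s + b)
      · split <;> exact congrArg some (by omega)
    rw [hstep, ih]
    rfl

theorem B_eq (lst : List Int) : smallest_pair_alt lst = M (P lst) := by
  cases lst with
  | nil => rfl
  | cons x xs =>
    unfold smallest_pair_alt
    rw [PySem.List.enumerate_cons, List.foldl_cons]
    have hstep : bstep (none, none) (0, x) = (none, some (x - 0)) := rfl
    rw [hstep, B_inv]
    simp only [show x - 0 = x from by omega]
    rw [mfold_eq, colvals_eq_P, ← M_append]
    rfl

-- ===== VERDICT (by name: the statement is the Claim_ definition above) =====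
theorem smallest_pair_spec : Claim_equal_smallest_pair := by
  intro lst _
  unfold Spec_smallest_pair
  rw [A_eq, B_eq]
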